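-- pv_equiv track=rewrite | github.com/rbrueda/Optimized-Frequent-Items-Algorithms | apriori-3-new.py | pruneLowImpactItems
-- ===== SOURCE A (Python) =====
-- import heapq
--
-- def pruneLowImpactItems(vertical_df, minSupport):
--     min_heap = [] #min heap for storing (support, item) pairs
--
--     #iterate through each entry in vertical_df (item -> movie, transaction -> user_ids)
--     for item, transactions in vertical_df.items():
--         support = len(transactions) #number of people rated the movie
--         if support >= minSupport:
--             heapq.heappush(min_heap, (support, item)) #push items into heap
--
--     #remove low-impact items
--     pruned_df = {}
--
--     while min_heap:
--         #remove values from min_heap -> we remove values in min heap that ___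
--         support, item = heapq.heappop(min_heap)
--
--         #only add values to vertical df where the support >= minSupport
--         if support >= minSupport:
--             pruned_df[item] = vertical_df[item]
--
--     return pruned_df
-- ===== SOURCE B (Python) =====
-- def pruneLowImpactItems(vertical_df, minSupport):
--     # one sort pass instead of a heap: collect qualifying (support, item) pairs,
--     # sort them once, then build the dict in that (ascending) order
--     kept = sorted((len(t), item) for item, t in vertical_df.items() if len(t) >= minSupport)
--     pruned_df = {}
--     for _support, item in kept:
--         pruned_df[item] = vertical_df[item]
--     return pruned_df
-- ===== Notes on version B (the rewrite author's own statement) =====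
-- stated objective: simpler
-- what changed: B drops the heap entirely (no heappush loop and no separate while-pop drain loop): it collects the qualifying (support, item) pairs, sorts them once with sorted(), and builds the result dict in that order, dropping the redundant second support check.
import Mathlib
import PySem

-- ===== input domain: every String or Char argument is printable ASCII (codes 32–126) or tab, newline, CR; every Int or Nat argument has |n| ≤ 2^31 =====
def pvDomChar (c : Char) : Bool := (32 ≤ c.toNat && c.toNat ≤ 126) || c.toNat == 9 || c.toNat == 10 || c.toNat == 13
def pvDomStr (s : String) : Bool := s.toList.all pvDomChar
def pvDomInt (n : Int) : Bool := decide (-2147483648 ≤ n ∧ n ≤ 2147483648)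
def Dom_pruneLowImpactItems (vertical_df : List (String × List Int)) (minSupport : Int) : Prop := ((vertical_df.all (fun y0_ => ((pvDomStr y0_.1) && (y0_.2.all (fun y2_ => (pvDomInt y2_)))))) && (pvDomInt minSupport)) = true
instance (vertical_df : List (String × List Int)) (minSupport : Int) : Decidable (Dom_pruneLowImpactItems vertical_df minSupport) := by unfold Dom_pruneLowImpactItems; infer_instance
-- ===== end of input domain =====

-- B drops the heap and its separate push/drain loops for a single sorted() pass; objective: simpler.

-- dict lookup vertical_df[item] (first match; the [] default is unreachable here:
-- every looked-up item was itself taken from vertical_df)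
def pvLookup (vertical_df : List (String × List Int)) (k : String) : List Int :=
  (((vertical_df.find? (fun q => q.1 == k)).map Prod.snd).getD [])

-- ===== PORT A =====
-- Python tuple comparison (support, item) < (support', item')
def pvPairLt (a b : Int × String) : Bool :=
  decide (a.1 < b.1) || (!(decide (b.1 < a.1)) && decide (a.2 < b.2))

-- heapq.heappop: extract the minimum element of the heap (value semantics of the
-- priority queue; returns (popped minimum, remaining elements))
def pvHeapPop : (Int × String) → List (Int × String) → ((Int × String) × List (Int × String))
  | m, [] => (m, [])
  | m, x :: t =>
    if pvPairLt x m then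
      ((pvHeapPop x t).1, m :: (pvHeapPop x t).2)
    else
      ((pvHeapPop m t).1, x :: (pvHeapPop m t).2)

theorem pvHeapPop_length (m : Int × String) (t : List (Int × String)) :
    (pvHeapPop m t).2.length = t.length := by
  induction t generalizing m with
  | nil => simp [pvHeapPop]
  | cons x t ih => simp only [pvHeapPop]; split <;> simp [ih]

-- the 'while min_heap:' drain loop of A
def pvDrain (vertical_df : List (String × List Int)) (minSupport : Int) :
    List (Int × String) → PySem.Dict String (List Int) → PySem.Dict String (List Int)
  | [], d => d
  | x :: t, d =>
    pvDrain vertical_df minSupport (pvHeapPop x t).2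
      (if minSupport ≤ (pvHeapPop x t).1.1
       then d.insert (pvHeapPop x t).1.2 (pvLookup vertical_df (pvHeapPop x t).1.2)
       else d)
termination_by h _ => h.length
decreasing_by simp [pvHeapPop_length]

def pruneLowImpactItems (vertical_df : List (String × List Int)) (minSupport : Int) : List (String × List Int) :=
  -- for item, transactions in vertical_df.items(): push (support, item) if support >= minSupport
  let min_heap := vertical_df.foldl
    (fun h q => if minSupport ≤ (q.2.length : Int) then h ++ [((q.2.length : Int), q.1)] else h) []
  (pvDrain vertical_df minSupport min_heap PySem.Dict.empty).items

-- ===== PORT B =====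
def pruneLowImpactItems_alt (vertical_df : List (String × List Int)) (minSupport : Int) : List (String × List Int) :=
  let kept := PySem.List.sorted2
    ((vertical_df.filter (fun q => minSupport ≤ (q.2.length : Int))).map
      (fun q => ((q.2.length : Int), q.1)))
    Prod.fst Prod.snd
  (kept.foldl (fun d p => d.insert p.2 (pvLookup vertical_df p.2)) PySem.Dict.empty).items

-- ===== PRECONDITION & SPEC =====
-- Pre_ requires the association list to have pairwise-distinct keys: it stands for a
-- Python dict, which cannot hold duplicate keys, so no Python input is excluded.
def Pre_pruneLowImpactItems (vertical_df : List (String × List Int)) (_minSupport : Int) : Prop :=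
  (vertical_df.map Prod.fst).Nodup

instance (vertical_df : List (String × List Int)) (minSupport : Int) : Decidable (Pre_pruneLowImpactItems vertical_df minSupport) := by unfold Pre_pruneLowImpactItems; infer_instance

def pvWitness_pruneLowImpactItems : (List (String × List Int)) × Int :=
  ([("a", [1]), ("b", [1, 2])], 1)

def Spec_pruneLowImpactItems (vertical_df : List (String × List Int)) (minSupport : Int) (out : List (String × List Int)) : Prop := out = pruneLowImpactItems_alt vertical_df minSupport
instance (vertical_df : List (String × List Int)) (minSupport : Int) (out : List (String × List Int)) : Decidable (Spec_pruneLowImpactItems vertical_df minSupport out) := by unfold Spec_pruneLowImpactItems; infer_instance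

-- ===== CLAIM (what is proved, stated in full; the proofs are below) =====
def Claim_equal_pruneLowImpactItems : Prop := ∀ (vertical_df : List (String × List Int)) (minSupport : Int), Dom_pruneLowImpactItems vertical_df minSupport → Pre_pruneLowImpactItems vertical_df minSupport → Spec_pruneLowImpactItems vertical_df minSupport (pruneLowImpactItems vertical_df minSupport)

-- ===== LEMMAS AND PROOFS =====

-- the lexicographic key under which Python compares (support, item) tuples
def pvKey (p : Int × String) : Lex (Int × String) := toLex p

theorem pvPairLt_eq (a b : Int × String) : pvPairLt a b = decide (pvKey a < pvKey b) := by
  by_cases h1 : a.1 < b.1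
  · simp [pvPairLt, pvKey, Prod.Lex.toLex_lt_toLex, h1]
  · by_cases h2 : b.1 < a.1
    · have hne : a.1 ≠ b.1 := fun h => absurd (h ▸ h2) (lt_irrefl _)
      simp [pvPairLt, pvKey, Prod.Lex.toLex_lt_toLex, h1, h2, hne]
    · have heq : a.1 = b.1 := le_antisymm (not_lt.1 h2) (not_lt.1 h1)
      simp [pvPairLt, pvKey, Prod.Lex.toLex_lt_toLex, heq]

theorem pvHeapPop_perm (m : Int × String) (t : List (Int × String)) :
    ((pvHeapPop m t).1 :: (pvHeapPop m t).2).Perm (m :: t) := by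
  induction t generalizing m with
  | nil => simp [pvHeapPop]
  | cons x t ih =>
    simp only [pvHeapPop]
    split
    · exact (List.Perm.swap (pvHeapPop x t).1 m (pvHeapPop x t).2).symm.trans ((ih x).cons m)
    · exact ((List.Perm.swap (pvHeapPop m t).1 x (pvHeapPop m t).2).symm.trans
        ((ih m).cons x)).trans (List.Perm.swap x m t).symm

theorem pvHeapPop_min (m : Int × String) (t : List (Int × String)) :
    ∀ y ∈ m :: t, pvKey (pvHeapPop m t).1 ≤ pvKey y := by
  induction t generalizing m with
  | nil => intro y hy; simp [pvHeapPop] at hy ⊢; simp [hy]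
  | cons x t ih =>
    intro y hy
    simp only [pvHeapPop]
    split
    · rename_i hlt
      rw [pvPairLt_eq, decide_eq_true_eq] at hlt
      rcases List.mem_cons.1 hy with rfl | hy'
      · exact le_trans (ih x x (by simp)) (le_of_lt hlt)
      · exact ih x y hy'
    · rename_i hlt
      rw [pvPairLt_eq, decide_eq_true_eq] at hlt
      rcases List.mem_cons.1 hy with rfl | hy'
      · exact ih y y (by simp)
      · rcases List.mem_cons.1 hy' with rfl | hy''
        · exact le_trans (ih m m (by simp)) (not_lt.1 hlt)
        · exact ih m y (by simp [hy''])

-- the sequence of values popped by A's drain loop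
def pvSel : List (Int × String) → List (Int × String)
  | [] => []
  | x :: t => (pvHeapPop x t).1 :: pvSel (pvHeapPop x t).2
termination_by h => h.length
decreasing_by simp [pvHeapPop_length]

theorem pvSel_perm (h : List (Int × String)) : (pvSel h).Perm h := by
  induction h using pvSel.induct with
  | case1 => simp [pvSel]
  | case2 x t ih =>
    rw [pvSel]
    exact (ih.cons _).trans (pvHeapPop_perm x t)

theorem pvSel_pairwise (h : List (Int × String)) :
    (pvSel h).Pairwise (fun a b => pvKey a ≤ pvKey b) := by
  induction h using pvSel.induct with
  | case1 => simp [pvSel]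
  | case2 x t ih =>
    rw [pvSel]
    refine List.Pairwise.cons ?_ ih
    intro b hb
    exact pvHeapPop_min x t b ((pvHeapPop_perm x t).mem_iff.1 (by simp [(pvSel_perm _).mem_iff.1 hb]))

theorem pvDrain_eq (vdf : List (String × List Int)) (ms : Int) (h : List (Int × String))
    (d : PySem.Dict String (List Int)) :
    pvDrain vdf ms h d =
      (pvSel h).foldl (fun d p => if ms ≤ p.1 then d.insert p.2 (pvLookup vdf p.2) else d) d := by
  induction h using pvSel.induct generalizing d with
  | case1 => rw [pvSel]; simp [pvDrain]
  | case2 x t ih => rw [pvSel, pvDrain]; simp only [List.foldl_cons]; exact ih _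

theorem pvHeap_build (ms : Int) (l : List (String × List Int)) (acc : List (Int × String)) :
    l.foldl (fun h q => if ms ≤ (q.2.length : Int) then h ++ [((q.2.length : Int), q.1)] else h) acc
      = acc ++ (l.filter (fun q => ms ≤ (q.2.length : Int))).map (fun q => ((q.2.length : Int), q.1)) := by
  induction l generalizing acc with
  | nil => simp
  | cons x l ih => by_cases hx : ms ≤ (x.2.length : Int) <;> simp [hx, ih]

theorem sorted2_eq_sorted_key (xs : List (Int × String)) :
    PySem.List.sorted2 xs Prod.fst Prod.snd = PySem.List.sorted xs pvKey := by
  rw [PySem.List.sorted_eq_foldl_insertBy]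
  simp only [PySem.List.sorted2]
  congr 1
  funext acc a
  congr 1
  funext u v
  exact pvPairLt_eq u v

-- ===== VERDICT (by name: the statement is the Claim_ definition above) =====
theorem pruneLowImpactItems_spec : Claim_equal_pruneLowImpactItems := by
  intro vdf ms _hdom hpre
  show pruneLowImpactItems vdf ms = pruneLowImpactItems_alt vdf ms
  simp only [pruneLowImpactItems, pruneLowImpactItems_alt]
  rw [pvHeap_build, List.nil_append, pvDrain_eq, sorted2_eq_sorted_key]
  set P := (vdf.filter (fun q => ms ≤ (q.2.length : Int))).map
      (fun q => ((q.2.length : Int), q.1)) with hP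
  have hmemP : ∀ p ∈ P, ms ≤ p.1 := by
    intro p hp
    rcases List.mem_map.1 hp with ⟨q, hq, rfl⟩
    exact (List.mem_filter.1 hq).2 |> of_decide_eq_true
  have hPnodup : (P.map pvKey).Nodup := by
    have hsnd : P.map Prod.snd = (vdf.filter (fun q => ms ≤ (q.2.length : Int))).map Prod.fst := by
      simp [hP, List.map_map, Function.comp]
    have h1 : (P.map Prod.snd).Nodup := by
      rw [hsnd]
      exact hpre.sublist (List.Sublist.map _ List.filter_sublist)
    have h2 : P.Nodup := h1.of_map
    exact (List.nodup_map_iff (fun a b hab => by simpa [pvKey] using hab)).2 h2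
  have hsel : PySem.List.sorted P pvKey = pvSel P := by
    apply PySem.List.sorted_eq_of_perm_of_pairwise_lt P (pvSel P) pvKey (pvSel_perm P)
    have hne : (pvSel P).Pairwise (fun a b => pvKey a ≠ pvKey b) := by
      have : ((pvSel P).map pvKey).Nodup :=
        (((pvSel_perm P).map pvKey).nodup_iff).2 hPnodup
      simpa [List.Nodup, List.pairwise_map] using this
    exact ((pvSel_pairwise P).and hne).imp (fun hab => lt_of_le_of_ne hab.1 hab.2)
  rw [hsel]
  congr 1
  apply PySem.List.foldl_congr_mem
  intro acc p hp
  have : ms ≤ p.1 := hmemP p ((pvSel_perm P).mem_iff.1 hp)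
  simp [this]
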